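-- pv_equiv track=rewrite | github.com/Wulfic/Cicada3301 | LiberPrimus/pages/page_00/analysis/spiral_oldenglish_analysis.py | diagonal_read
-- ===== SOURCE A (Python) =====
-- def diagonal_read(text, width):
--     """Read text diagonally from grid"""
--     height = (len(text) + width - 1) // width
--     grid = []
--     idx = 0
--     for _ in range(height):
--         row = []
--         for _ in range(width):
--             if idx < len(text):
--                 row.append(text[idx])
--             else:
--                 row.append(' ')
--             idx += 1
--         grid.append(row)
--
--     result = []
--     # Read all diagonals from top-left to bottom-right
--     for d in range(height + width - 1):
--         for i in range(max(0, d - width + 1), min(d + 1, height)):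
--             j = d - i
--             if j < len(grid[i]):
--                 result.append(grid[i][j])
--
--     return ''.join(result).replace(' ', '')
-- ===== SOURCE B (Python) =====
-- def diagonal_read(text, width):
--     """Read text diagonally from grid (single grouping pass by diagonal index)."""
--     height = (len(text) + width - 1) // width
--     buckets = [[] for _ in range(height + width - 1)]
--     for k, ch in enumerate(text):
--         buckets[k // width + k % width].append(ch)
--     return ''.join(''.join(b) for b in buckets).replace(' ', '')
-- ===== Notes on version B (the rewrite author's own statement) =====
-- stated objective: alternative
-- what changed: B replaces A's grid construction plus nested anti-diagonal scan with a single grouping pass that appends each character to a bucket keyed by its diagonal index k//width + k%width, then joins the buckets.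
-- outside the precondition, e.g. on diagonal_read('ab', -1): A returns '', B raises IndexError
import Mathlib
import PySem

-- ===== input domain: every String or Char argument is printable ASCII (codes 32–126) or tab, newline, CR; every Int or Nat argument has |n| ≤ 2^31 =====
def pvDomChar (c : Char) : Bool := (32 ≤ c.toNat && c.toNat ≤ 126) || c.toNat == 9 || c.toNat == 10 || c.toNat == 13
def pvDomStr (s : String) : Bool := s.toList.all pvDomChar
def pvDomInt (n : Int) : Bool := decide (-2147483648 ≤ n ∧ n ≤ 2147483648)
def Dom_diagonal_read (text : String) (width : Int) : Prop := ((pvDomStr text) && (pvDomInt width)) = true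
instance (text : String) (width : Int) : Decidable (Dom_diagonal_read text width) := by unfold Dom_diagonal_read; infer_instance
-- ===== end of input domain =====

-- B replaces A's grid build plus nested anti-diagonal scan by one grouping pass into
-- per-diagonal buckets (bucket index k//width + k%width), then joins the buckets.

-- ===== PORT A =====
def diagonal_read (text : String) (width : Int) : String :=
  let cs := text.toList
  let height := PySem.Int.floordiv ((cs.length : Int) + width - 1) width
  let gridIdx := (PySem.List.pyRange 0 height 1).foldl (fun (st : List (List Char) × Int) _ =>
      let ri := (PySem.List.pyRange 0 width 1).foldl (fun (st2 : List Char × Int) _ =>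
          (st2.1 ++ [if st2.2 < (cs.length : Int) then (PySem.List.pyGet? cs st2.2).getD ' ' else ' '],
           st2.2 + 1))
        ([], st.2)
      (st.1 ++ [ri.1], ri.2)) ([], 0)
  let grid := gridIdx.1
  let result := (PySem.List.pyRange 0 (height + width - 1) 1).foldl (fun res d =>
      (PySem.List.pyRange (max 0 (d - width + 1)) (min (d + 1) height) 1).foldl (fun res2 i =>
          let row := (PySem.List.pyGet? grid i).getD []
          if d - i < (row.length : Int) then res2 ++ [(PySem.List.pyGet? row (d - i)).getD ' ']
          else res2) res) []
  PySem.Str.replace (String.ofList result) " " ""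

-- ===== PORT B =====
def diagonal_read_alt (text : String) (width : Int) : String :=
  let cs := text.toList
  let height := PySem.Int.floordiv ((cs.length : Int) + width - 1) width
  let buckets0 : List (List Char) := (PySem.List.pyRange 0 (height + width - 1) 1).map (fun _ => [])
  let buckets := (PySem.List.enumerate cs).foldl (fun bs kc =>
      bs.modify (PySem.Int.floordiv kc.1 width + PySem.Int.mod kc.1 width).toNat
        (fun b => b ++ [kc.2])) buckets0
  PySem.Str.replace (String.ofList buckets.flatten) " " ""


-- ===== PRECONDITION & SPEC =====
-- Pre_ excludes width = 0, where A raises ZeroDivisionError, and negative width with nonempty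
-- text, where A's vacuous loop ranges accidentally return '' while B's bucket indexing raises
-- IndexError (negative width with empty text stays inside Pre_: both return '').
def Pre_diagonal_read (text : String) (width : Int) : Prop :=
  0 < width ∨ (width < 0 ∧ text = "")
instance (text : String) (width : Int) : Decidable (Pre_diagonal_read text width) := by
  unfold Pre_diagonal_read; infer_instance

def pvWitness_diagonal_read : String × Int := ("abcdef", 2)

def Spec_diagonal_read (text : String) (width : Int) (out : String) : Prop := out = diagonal_read_alt text width
instance (text : String) (width : Int) (out : String) : Decidable (Spec_diagonal_read text width out) := by unfold Spec_diagonal_read; infer_instance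

-- ===== CLAIM (what is proved, stated in full; the proofs are below) =====
def Claim_equal_diagonal_read : Prop := ∀ (text : String) (width : Int), Dom_diagonal_read text width → Pre_diagonal_read text width → Spec_diagonal_read text width (diagonal_read text width)

-- ===== LEMMAS AND PROOFS =====

def pvDiag (w k : Int) : Int := PySem.Int.floordiv k w + PySem.Int.mod k w

def pvKlist (cs : List Char) (w n d : Int) : List Char :=
  ((PySem.List.pyRange 0 n 1).filter (fun k => decide (pvDiag w k = d))).map
    (fun k => cs.getD k.toNat ' ')

theorem pv_get {α : Type} (d : α) (xs : List α) (i : Int) (h0 : 0 ≤ i) :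
    (PySem.List.pyGet? xs i).getD d = xs.getD i.toNat d :=
  PySem.List.pyGetD_of_nonneg xs d h0

theorem pv_go_space (fuel : Nat) (l acc : List Char) (h : l.length ≤ fuel) :
    PySem.Chars.replace.go [' '] [] fuel l acc = acc.reverse ++ l.filter (fun c => !(c == ' ')) := by
  induction fuel generalizing l acc with
  | zero => cases l with
    | nil => simp [PySem.Chars.replace.go]
    | cons c t => simp at h
  | succ n ih =>
    cases l with
    | nil => simp [PySem.Chars.replace.go]
    | cons c t =>
      simp only [PySem.Chars.replace.go, List.isPrefixOf]
      by_cases hc : c = ' '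
      · subst hc; simp only [beq_self_eq_true, Bool.and_true, if_pos]
        rw [ih]
        · simp
        · simpa using Nat.le_of_succ_le_succ (by simpa using h)
      · have hb : ((' ' == c) && true) = false := by simp; exact fun hh => hc hh.symm
        rw [if_neg (by simp [hb])]
        rw [ih]
        · simp [hc]
        · simpa using Nat.le_of_succ_le_succ (by simpa using h)

theorem pv_replace_space (l : List Char) :
    PySem.Chars.replace l [' '] [] = l.filter (fun c => !(c == ' ')) := by
  rw [PySem.Chars.replace]
  simp only [List.isEmpty_cons]
  rw [if_neg (by simp), pv_go_space _ _ _ (le_refl _)]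
  simp

theorem pv_row_fold (cs : List Char) (l : List Int) (acc : List Char) (idx : Int) (h0 : 0 ≤ idx) :
    l.foldl (fun (st2 : List Char × Int) _ =>
        (st2.1 ++ [if st2.2 < (cs.length : Int) then (PySem.List.pyGet? cs st2.2).getD ' ' else ' '],
         st2.2 + 1)) (acc, idx)
    = (acc ++ (List.range l.length).map (fun j => cs.getD (idx.toNat + j) ' '), idx + l.length) := by
  induction l generalizing acc idx with
  | nil => simp
  | cons x t ih =>
    simp only [List.foldl_cons, List.length_cons]
    rw [ih _ _ (by omega)]
    have hc : (if idx < (cs.length : Int) then (PySem.List.pyGet? cs idx).getD ' ' else ' ')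
        = cs.getD idx.toNat ' ' := by
      by_cases h : idx < (cs.length : Int)
      · rw [if_pos h, pv_get _ _ _ h0]
      · rw [if_neg h, List.getD_eq_default]
        omega
    have hj : ∀ j : Nat, (idx + 1).toNat + j = idx.toNat + (j + 1) := by omega
    refine Prod.ext ?_ ?_
    · show _ = _
      simp only [List.range_succ_eq_map, List.map_cons, List.map_map, Function.comp_def, hj, hc,
        Nat.add_zero, List.append_assoc, List.singleton_append]
    · show idx + 1 + (t.length : Int) = idx + ((t.length : Nat) + 1 : Nat)
      push_cast; ring

theorem pv_grid_fold (cs : List Char) (W : Nat) (l : List Int) (accg : List (List Char))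
    (idx : Int) (h0 : 0 ≤ idx) :
    l.foldl (fun (st : List (List Char) × Int) _ =>
        (st.1 ++ [((PySem.List.pyRange 0 (W : Int) 1).foldl (fun (st2 : List Char × Int) _ =>
            (st2.1 ++ [if st2.2 < (cs.length : Int) then (PySem.List.pyGet? cs st2.2).getD ' ' else ' '],
             st2.2 + 1)) ([], st.2)).1],
         ((PySem.List.pyRange 0 (W : Int) 1).foldl (fun (st2 : List Char × Int) _ =>
            (st2.1 ++ [if st2.2 < (cs.length : Int) then (PySem.List.pyGet? cs st2.2).getD ' ' else ' '],
             st2.2 + 1)) ([], st.2)).2)) (accg, idx)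
    = (accg ++ (List.range l.length).map
          (fun i => (List.range W).map (fun j => cs.getD (idx.toNat + i * W + j) ' ')),
       idx + l.length * W) := by
  induction l generalizing accg idx with
  | nil => simp
  | cons x t ih =>
    simp only [List.foldl_cons, List.length_cons]
    rw [pv_row_fold cs _ _ _ h0]
    have hlen : (PySem.List.pyRange 0 (W : Int) 1).length = W := by
      rw [PySem.List.length_pyRange_one]; omega
    rw [ih _ _ (by positivity)]
    have hj : ∀ i j : Nat, (idx + (W : Int)).toNat + i * W + j = idx.toNat + (i + 1) * W + j := by
      intro i j
      have h2 : (idx + (W : Int)).toNat = idx.toNat + W := by omega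
      rw [h2]; ring
    refine Prod.ext ?_ ?_
    · show _ = _
      simp only [List.range_succ_eq_map, List.map_cons, List.map_map, Function.comp_def, hlen,
        Nat.succ_eq_add_one, hj, Nat.zero_mul, Nat.add_zero, List.append_assoc,
        List.singleton_append, List.nil_append]
    · show idx + (PySem.List.pyRange 0 (W : Int) 1).length + (t.length : Int) * W
          = idx + ((t.length + 1) * W : Nat)
      rw [hlen]; push_cast; ring

theorem pv_sorted_eq {l1 l2 : List Int} (h1 : l1.Pairwise (· < ·)) (h2 : l2.Pairwise (· < ·))
    (h : ∀ x, x ∈ l1 ↔ x ∈ l2) : l1 = l2 := by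
  have hp : l1.Perm l2 := (List.perm_ext_iff_of_nodup
    (h1.imp fun h => ne_of_lt h) (h2.imp fun h => ne_of_lt h)).2 h
  exact List.Perm.eq_of_pairwise (fun a b _ _ hab hba => absurd hba (lt_asymm hab)) h1 h2 hp

theorem pv_reindex (W H : Nat) (hW : 1 ≤ W) (d : Int) :
    ((PySem.List.pyRange (max 0 (d - W + 1)) (min (d + 1) (H : Int)) 1).filter
        (fun i => decide (d - i < (W : Int)))).map (fun i => i * W + (d - i))
    = (PySem.List.pyRange 0 ((H : Int) * W) 1).filter (fun k => decide (pvDiag W k = d)) := by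
  have hW' : (0 : Int) < W := by exact_mod_cast hW
  apply pv_sorted_eq
  · rw [List.pairwise_map]
    refine ((PySem.List.pairwise_lt_pyRange_one _ _).filter _).imp_of_mem ?_
    intro a b ha hb hab
    simp only [List.mem_filter, PySem.List.mem_pyRange_one, decide_eq_true_eq] at ha hb
    have h1 : d - a < (W : Int) := ha.2
    have hbd : b < d + 1 := lt_of_lt_of_le hb.1.2 (min_le_left _ _)
    have hW2 : (1 : Int) < (W : Int) := by omega
    nlinarith [mul_pos (show (0:Int) < b - a by omega) (show (0:Int) < (W:Int) - 1 by omega)]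
  · exact (PySem.List.pairwise_lt_pyRange_one _ _).filter _
  · intro x
    simp only [List.mem_map, List.mem_filter, PySem.List.mem_pyRange_one, decide_eq_true_eq]
    constructor
    · rintro ⟨i, ⟨⟨hlo, hhi⟩, hj⟩, rfl⟩
      have h0i : 0 ≤ i := le_trans (le_max_left _ _) hlo
      have hiW : d - (W : Int) + 1 ≤ i := le_trans (le_max_right _ _) hlo
      have hid : i ≤ d := by
        have := lt_of_lt_of_le hhi (min_le_left _ _); omega
      have hiH : i < (H : Int) := lt_of_lt_of_le hhi (min_le_right _ _)
      have hq : PySem.Int.floordiv (i * W + (d - i)) W = i := by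
        rw [PySem.Int.floordiv_eq_iff_of_pos hW']
        constructor
        · nlinarith
        · nlinarith
      have hm : PySem.Int.mod (i * W + (d - i)) W = d - i := by
        have := PySem.Int.floordiv_mul_add_mod (i * W + (d - i)) W
        rw [hq] at this; linarith
      refine ⟨⟨by nlinarith, by nlinarith⟩, ?_⟩
      rw [pvDiag, hq, hm]; ring
    · rintro ⟨⟨h0, hH⟩, hdg⟩
      set q := PySem.Int.floordiv x W with hqdef
      set r := PySem.Int.mod x W with hrdef
      have hqr : q * W + r = x := PySem.Int.floordiv_mul_add_mod x W
      have hr0 : 0 ≤ r := PySem.Int.mod_nonneg x hW'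
      have hrW : r < W := PySem.Int.mod_lt x hW'
      have hsum : q + r = d := hdg
      have hq0 : 0 ≤ q := by nlinarith
      have hqH : q < (H : Int) := by nlinarith
      refine ⟨q, ⟨⟨?_, ?_⟩, by omega⟩, by linarith⟩
      · exact max_le hq0 (by omega)
      · exact lt_min (by omega) hqH

theorem pv_bucket_fold (w : Int) (l : List (Int × Char)) (bs : List (List Char))
    (h : ∀ p ∈ l, 0 ≤ pvDiag w p.1 ∧ pvDiag w p.1 < (bs.length : Int)) :
    l.foldl (fun bs kc => bs.modify (PySem.Int.floordiv kc.1 w + PySem.Int.mod kc.1 w).toNat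
        (fun b => b ++ [kc.2])) bs
    = (List.range bs.length).map (fun d =>
        bs.getD d [] ++ (l.filter (fun p => decide (pvDiag w p.1 = (d : Int)))).map (·.2)) := by
  induction l generalizing bs with
  | nil =>
    simp only [List.foldl_nil, List.filter_nil, List.map_nil, List.append_nil]
    apply List.ext_getElem
    · simp
    · intro i h1 h2
      simp [List.getD, List.getElem?_eq_getElem h1]
  | cons p t ih =>
    simp only [List.foldl_cons]
    rw [ih]
    · have hlen : (bs.modify (PySem.Int.floordiv p.1 w + PySem.Int.mod p.1 w).toNat
          (fun b => b ++ [p.2])).length = bs.length := List.length_modify _ _ _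
      rw [hlen]
      apply List.map_congr_left
      intro d hd
      rw [List.mem_range] at hd
      have hp := h p (List.mem_cons_self)
      have hkey : ((PySem.Int.floordiv p.1 w + PySem.Int.mod p.1 w).toNat = d)
          ↔ (pvDiag w p.1 = (d : Int)) := by
        unfold pvDiag at hp ⊢; omega
      have hmlen : d < ((bs.modify (PySem.Int.floordiv p.1 w + PySem.Int.mod p.1 w).toNat
          (fun b => b ++ [p.2])).length) := by
        rw [List.length_modify]; exact hd
      have hmod : (bs.modify (PySem.Int.floordiv p.1 w + PySem.Int.mod p.1 w).toNat
          (fun b => b ++ [p.2])).getD d []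
          = if pvDiag w p.1 = (d : Int) then bs.getD d [] ++ [p.2] else bs.getD d [] := by
        rw [List.getD_eq_getElem _ _ hmlen, List.getElem_modify]
        by_cases hc : pvDiag w p.1 = (d : Int)
        · rw [if_pos (hkey.2 hc), if_pos hc, List.getD_eq_getElem _ _ hd]
        · rw [if_neg (fun he => hc (hkey.1 he)), if_neg hc, List.getD_eq_getElem _ _ hd]
      rw [hmod, List.filter_cons]
      by_cases hc : pvDiag w p.1 = (d : Int)
      · rw [if_pos hc, if_pos (by simpa using hc)]
        simp
      · rw [if_neg hc, if_neg (by simpa using hc)]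
    · intro q hq
      rw [List.length_modify]
      exact h q (List.mem_cons_of_mem _ hq)

theorem pv_klist_cut (cs : List Char) (W H : Nat) (hLHW : cs.length ≤ H * W) (d : Int) :
    (pvKlist cs (W : Int) ((H : Int) * W) d).filter (fun c => !(c == ' '))
    = (pvKlist cs (W : Int) (cs.length : Int) d).filter (fun c => !(c == ' ')) := by
  unfold pvKlist
  rw [show ((H : Int) * W) = ((H * W : Nat) : Int) by push_cast; ring]
  rw [PySem.List.pyRange_one_append 0 (cs.length : Int) ((H * W : Nat) : Int)
      (by positivity) (by exact_mod_cast hLHW)]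
  rw [List.filter_append, List.map_append, List.filter_append]
  have h2 : (((PySem.List.pyRange (cs.length : Int) ((H * W : Nat) : Int) 1).filter
      (fun k => decide (pvDiag (W : Int) k = d))).map
        (fun k => cs.getD k.toNat ' ')).filter (fun c => !(c == ' ')) = [] := by
    rw [List.filter_eq_nil_iff]
    intro c hc
    rcases List.mem_map.1 hc with ⟨k, hk, rfl⟩
    rcases List.mem_filter.1 hk with ⟨hk1, _⟩
    rcases PySem.List.mem_pyRange_one.1 hk1 with ⟨hkL, _⟩
    rw [List.getD_eq_default _ _ (by omega)]
    simp
  rw [h2, List.append_nil]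

theorem pv_main_pos (text : String) (W : Nat) (hW : 1 ≤ W) :
    diagonal_read text (W : Int) = diagonal_read_alt text (W : Int) := by
  have hW' : (0 : Int) < (W : Int) := by exact_mod_cast hW
  rw [← String.toList_inj]
  unfold diagonal_read diagonal_read_alt
  set cs := text.toList with hcs
  set H := (cs.length + W - 1) / W with hH
  have hheight : PySem.Int.floordiv ((cs.length : Int) + (W : Int) - 1) (W : Int) = (H : Int) := by
    rw [show ((cs.length : Int) + (W : Int) - 1) = ((cs.length + W - 1 : Nat) : Int) by omega,
      PySem.Int.floordiv_natCast, ← hH]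
  have hLHW : cs.length ≤ H * W := by
    have h1 := Nat.div_add_mod (cs.length + W - 1) W
    have h2 : (cs.length + W - 1) % W < W := Nat.mod_lt _ (by omega)
    obtain ⟨M, hM⟩ : ∃ M, W * ((cs.length + W - 1) / W) = M := ⟨_, rfl⟩
    rw [hM] at h1
    rw [hH, Nat.mul_comm, hM]
    omega
  simp only [hheight]
  rw [PySem.Str.toList_replace, PySem.Str.toList_replace,
    show (" " : String).toList = [' '] from rfl, show ("" : String).toList = [] from rfl]
  simp only [String.toList_ofList]
  rw [pv_replace_space, pv_replace_space]
  -- A side: grid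
  rw [pv_grid_fold cs W _ [] 0 le_rfl]
  have hlenH : (PySem.List.pyRange 0 ((H : Nat) : Int) 1).length = H := by
    rw [PySem.List.length_pyRange_one, Int.sub_zero, Int.toNat_natCast]
  simp only [hlenH, List.nil_append, Int.toNat_zero, Nat.zero_add]
  set G := (List.range H).map (fun i => (List.range W).map (fun j => cs.getD (i * W + j) ' '))
    with hG
  have hbody : ∀ (res : List Char) (d : Int),
      List.foldl (fun res2 i =>
        if d - i < ((((PySem.List.pyGet? G i).getD []).length : Nat) : Int) then
          res2 ++ [(PySem.List.pyGet? ((PySem.List.pyGet? G i).getD []) (d - i)).getD ' ']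
        else res2) res (PySem.List.pyRange (max 0 (d - (W : Int) + 1)) (min (d + 1) (H : Int)) 1)
      = res ++ ((PySem.List.pyRange (max 0 (d - (W : Int) + 1)) (min (d + 1) (H : Int)) 1).filter
          (fun i => decide (d - i < ((((PySem.List.pyGet? G i).getD []).length : Nat) : Int)))).map
          (fun i => (PySem.List.pyGet? ((PySem.List.pyGet? G i).getD []) (d - i)).getD ' ') :=
    fun res d => PySem.List.foldl_append_ite _ _ _ _
  simp only [hbody]
  rw [PySem.List.foldl_append_eq_flatMap, List.nil_append]
  -- A side per-diagonal
  have hArow : ∀ i : Int, 0 ≤ i → i < (H : Int) →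
      (PySem.List.pyGet? G i).getD [] = (List.range W).map (fun j => cs.getD (i.toNat * W + j) ' ') := by
    intro i h0 h1
    rw [pv_get _ _ _ h0, hG, List.getD_eq_getElem _ _ (by simp; omega)]
    simp
  have hAd : ∀ d ∈ PySem.List.pyRange 0 ((H : Int) + (W : Int) - 1) 1,
      ((PySem.List.pyRange (max 0 (d - (W : Int) + 1)) (min (d + 1) (H : Int)) 1).filter
          (fun i => decide (d - i < ((((PySem.List.pyGet? G i).getD []).length : Nat) : Int)))).map
          (fun i => (PySem.List.pyGet? ((PySem.List.pyGet? G i).getD []) (d - i)).getD ' ')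
      = pvKlist cs (W : Int) ((H : Int) * (W : Int)) d := by
    intro d hd
    rcases PySem.List.mem_pyRange_one.1 hd with ⟨hd0, hdlt⟩
    rw [List.filter_congr (q := fun i => decide (d - i < (W : Int)))
      (by
        intro i hi
        rcases PySem.List.mem_pyRange_one.1 hi with ⟨hi0', hi1⟩
        have h0i : (0 : Int) ≤ i := le_trans (le_max_left _ _) hi0'
        have hiH : i < (H : Int) := lt_of_lt_of_le hi1 (min_le_right _ _)
        rw [hArow i h0i hiH]
        simp)]
    rw [List.map_congr_left (g := fun i : Int => cs.getD ((i * (W : Int) + (d - i)).toNat) ' ')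
      (by
        intro i hi
        rcases List.mem_filter.1 hi with ⟨hi1, hi2⟩
        rcases PySem.List.mem_pyRange_one.1 hi1 with ⟨hi0', hilt⟩
        have h0i : (0 : Int) ≤ i := le_trans (le_max_left _ _) hi0'
        have hiH : i < (H : Int) := lt_of_lt_of_le hilt (min_le_right _ _)
        have hid : i ≤ d := by
          have := lt_of_lt_of_le hilt (min_le_left _ _); omega
        have hjW : d - i < (W : Int) := by simpa using hi2
        rw [hArow i h0i hiH, pv_get _ _ _ (by omega : (0:Int) ≤ d - i),
          List.getD_eq_getElem _ _ (by simp; omega)]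
        simp only [List.getElem_map, List.getElem_range]
        congr 1
        obtain ⟨a, rfl⟩ : ∃ a : Nat, i = (a : Int) := ⟨i.toNat, by omega⟩
        obtain ⟨e, he⟩ : ∃ e : Nat, d - (a : Int) = (e : Int) := ⟨(d - a).toNat, by omega⟩
        rw [he, Int.toNat_natCast]
        have hcast : ((a : Int) * ((W : Nat) : Int) + ((e : Nat) : Int)) = ((a * W + e : Nat) : Int) := by
          push_cast; ring
        rw [hcast]
        exact (Int.toNat_natCast _).symm)]
    rw [show (fun i : Int => cs.getD ((i * (W : Int) + (d - i)).toNat) ' ')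
        = (fun k : Int => cs.getD k.toNat ' ') ∘ (fun i : Int => i * (W : Int) + (d - i)) from rfl,
      ← List.map_map, pv_reindex W H hW d]
    rfl
  rw [List.flatMap_congr hAd]
  -- B side
  set bs0 := (PySem.List.pyRange 0 ((H : Int) + (W : Int) - 1) 1).map
    (fun _ => ([] : List Char)) with hbs0
  have hbs0len : bs0.length = H + W - 1 := by
    rw [hbs0, List.length_map, PySem.List.length_pyRange_one]; omega
  have hcond : ∀ p ∈ PySem.List.enumerate cs, 0 ≤ pvDiag (W : Int) p.1 ∧
      pvDiag (W : Int) p.1 < (bs0.length : Int) := by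
    intro p hp
    rw [PySem.List.mem_enumerate_iff] at hp
    obtain ⟨k, hk, rfl⟩ := hp
    simp only [zero_add]
    unfold pvDiag
    rw [PySem.Int.floordiv_natCast, PySem.Int.mod_natCast, hbs0len]
    have hdiv : k / W < H := (Nat.div_lt_iff_lt_mul (by omega)).2 (lt_of_lt_of_le hk hLHW)
    have hmod : k % W < W := Nat.mod_lt _ (by omega)
    constructor
    · positivity
    · push_cast; omega
  rw [pv_bucket_fold (W : Int) (PySem.List.enumerate cs) bs0 hcond, hbs0len]
  have hbs0d : ∀ d : Nat, bs0.getD d [] = [] := by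
    intro d
    rcases Nat.lt_or_ge d bs0.length with h | h
    · rw [List.getD_eq_getElem _ _ h]
      simp [hbs0]
    · rw [List.getD_eq_default _ _ h]
  simp only [hbs0d, List.nil_append]
  rw [← List.flatMap_def, PySem.List.enumerate_eq_map_pyRange cs ' ']
  simp only [List.filter_map, List.map_map, Function.comp_def, PySem.List.len_eq]
  have hBd : ∀ dn ∈ List.range (H + W - 1),
      ((PySem.List.pyRange 0 ((cs.length : Nat) : Int) 1).filter
          (fun j => decide (pvDiag (W : Int) j = (dn : Int)))).map
          (fun j => PySem.List.pyGetD cs j ' ')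
      = pvKlist cs (W : Int) ((cs.length : Nat) : Int) (dn : Int) := by
    intro dn _
    unfold pvKlist
    apply List.map_congr_left
    intro j hj
    rcases List.mem_filter.1 hj with ⟨hj1, _⟩
    rcases PySem.List.mem_pyRange_one.1 hj1 with ⟨hj0, _⟩
    exact PySem.List.pyGetD_of_nonneg cs ' ' hj0
  rw [List.flatMap_congr hBd]
  rw [PySem.List.pyRange_one 0 ((H : Int) + (W : Int) - 1),
    show (((H : Int) + (W : Int) - 1) - 0).toNat = H + W - 1 by omega,
    List.flatMap_map]
  simp only [zero_add]
  rw [List.filter_flatMap, List.filter_flatMap]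
  apply List.flatMap_congr
  intro dn _
  exact pv_klist_cut cs W H hLHW (dn : Int)

theorem pv_main_neg (width : Int) (hn : width < 0) :
    diagonal_read "" width = diagonal_read_alt "" width := by
  unfold diagonal_read diagonal_read_alt
  simp only [show ("" : String).toList = [] from rfl, List.length_nil, Nat.cast_zero, zero_add]
  have hq1 : PySem.Int.floordiv (width - 1) width + width - 1 ≤ 0 := by
    by_contra hcon
    rw [not_le] at hcon
    set q := PySem.Int.floordiv (width - 1) width with hqd
    set r := PySem.Int.mod (width - 1) width with hrd
    have h1 : q * width + r = width - 1 := PySem.Int.floordiv_mul_add_mod _ _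
    have h2 := PySem.Int.mod_neg_bounds (width - 1) hn
    have h3 : 2 - width ≤ q := by omega
    nlinarith [mul_le_mul_of_nonpos_right h3 (show width ≤ 0 by omega)]
  rw [PySem.List.pyRange_one_eq_nil (by omega : PySem.Int.floordiv (width - 1) width + width - 1 ≤ 0)]
  simp [PySem.List.enumerate_nil]

-- ===== VERDICT (by name: the statement is the Claim_ definition above) =====
theorem diagonal_read_spec : Claim_equal_diagonal_read := by
  intro text width hdom hpre
  unfold Spec_diagonal_read
  rcases hpre with hpos | ⟨hneg, hempty⟩
  · obtain ⟨W, rfl⟩ : ∃ W : Nat, width = (W : Int) := ⟨width.toNat, by omega⟩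
    exact pv_main_pos text W (by exact_mod_cast hpos)
  · subst hempty
    exact pv_main_neg width hneg
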